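-- pv_equiv track=rewrite | github.com/devomnimind/OmniMind-Public | src/integrations/mcp_compressor.py | _compress_summary
-- ===== SOURCE A (Python) =====
-- def _compress_summary(text: str, target_length: int) -> str:
--     """Extract summary of text."""
--     lines = text.split("\n")
--     summary_lines = []
--     current_length = 0
--
--     for line in lines:
--         if line.strip():  # Skip empty lines
--             if current_length + len(line) <= target_length:
--                 summary_lines.append(line)
--                 current_length += len(line)
--             else:
--                 break
--
--     result = "\n".join(summary_lines)
--     if len(result) < len(text):
--         result += "\n[...]"
--
--     return result
-- ===== SOURCE B (Python) =====
-- def _compress_summary(text: str, target_length: int) -> str: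
--     """Three-phase rewrite: filter non-blank lines, build running prefix sums
--     of their lengths, count how many prefix sums fit, then slice and join."""
--     nonblank = [line for line in text.split("\n") if line.strip()]
--     sums = []
--     s = 0
--     for line in nonblank:
--         s += len(line)
--         sums.append(s)
--     k = sum(1 for t in sums if t <= target_length)
--     result = "\n".join(nonblank[:k])
--     if len(result) < len(text):
--         result += "\n[...]"
--     return result
-- ===== Notes on version B (the rewrite author's own statement) =====
-- stated objective: alternative
-- what changed: Replaces A's single stateful append-and-break loop by three separate phases: filter the non-blank lines once, build a running prefix-sum list of their lengths, count how many prefix sums stay within target_length, and slice-and-join that prefix; no break and no mutable running state interleaved with the output list.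
import Mathlib
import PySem

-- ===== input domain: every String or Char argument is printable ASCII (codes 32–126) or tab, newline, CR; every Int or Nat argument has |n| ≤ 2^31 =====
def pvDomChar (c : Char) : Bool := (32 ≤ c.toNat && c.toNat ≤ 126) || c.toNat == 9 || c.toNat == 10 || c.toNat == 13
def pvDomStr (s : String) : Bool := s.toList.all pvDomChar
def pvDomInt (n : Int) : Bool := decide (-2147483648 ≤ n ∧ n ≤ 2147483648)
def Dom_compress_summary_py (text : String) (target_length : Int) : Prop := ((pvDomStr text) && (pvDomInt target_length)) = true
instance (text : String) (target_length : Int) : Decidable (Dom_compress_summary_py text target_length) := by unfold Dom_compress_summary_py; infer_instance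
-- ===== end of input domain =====

-- B replaces A's single stateful accumulate-and-break loop by three separate phases
-- (filter non-blank lines, running prefix sums of their lengths, count sums ≤ target, slice);
-- objective: a simpler break-free decomposition, same cost.

-- ===== PORT A =====
-- the for-loop of A: state = (summary_lines so far implicit in the returned prefix, current_length); 'break' returns []
def pvLoopA (target : Int) : List String → Int → List String
  | [], _ => []
  | l :: ls, cur =>
    if PySem.Str.strip l ≠ "" then
      if cur + PySem.Str.len l ≤ target then l :: pvLoopA target ls (cur + PySem.Str.len l)
      else []
    else pvLoopA target ls cur

def compress_summary_py (text : String) (target_length : Int) : String :=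
  let lines := (PySem.Str.split? text "\n").getD []   -- sep "\n" ≠ "": split? is some here
  let summary_lines := pvLoopA target_length lines 0
  let result := PySem.Str.join "\n" summary_lines
  if PySem.Str.len result < PySem.Str.len text then result ++ "\n[...]" else result

-- ===== PORT B =====
-- Source B's running-sum loop: sums.append(s) with s the running total
def pvSums (cur : Int) : List String → List Int
  | [] => []
  | l :: ls => (cur + PySem.Str.len l) :: pvSums (cur + PySem.Str.len l) ls

def compress_summary_py_alt (text : String) (target_length : Int) : String :=
  let nonblank := ((PySem.Str.split? text "\n").getD []).filter (fun l => PySem.Str.strip l != "")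
  let sums := pvSums 0 nonblank
  let k := (sums.filter (fun t => t ≤ target_length)).length
  let result := PySem.Str.join "\n" (nonblank.take k)
  if PySem.Str.len result < PySem.Str.len text then result ++ "\n[...]" else result

-- ===== PRECONDITION & SPEC =====
def Spec_compress_summary_py (text : String) (target_length : Int) (out : String) : Prop := out = compress_summary_py_alt text target_length
instance (text : String) (target_length : Int) (out : String) : Decidable (Spec_compress_summary_py text target_length out) := by unfold Spec_compress_summary_py; infer_instance

-- ===== CLAIM (what is proved, stated in full; the proofs are below) =====
def Claim_equal_compress_summary_py : Prop := ∀ (text : String) (target_length : Int), Dom_compress_summary_py text target_length → Spec_compress_summary_py text target_length (compress_summary_py text target_length)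

-- ===== LEMMAS AND PROOFS =====

-- every prefix sum starting at cur is ≥ cur (line lengths are nonnegative)
lemma pvSums_ge (xs : List String) (cur : Int) : ∀ t ∈ pvSums cur xs, cur ≤ t := by
  induction xs generalizing cur with
  | nil => simp [pvSums]
  | cons l ls ih =>
    intro t ht
    simp only [pvSums, List.mem_cons] at ht
    have hlen : (0:Int) ≤ PySem.Str.len l := by
      rw [PySem.Str.len_eq]; positivity
    rcases ht with rfl | ht
    · omega
    · have := ih (cur + PySem.Str.len l) t ht; omega

-- A's break loop computes exactly B's take-by-count on the filtered list
lemma loopA_eq_take (target : Int) (lines : List String) (cur : Int) :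
    pvLoopA target lines cur =
      (lines.filter (fun l => PySem.Str.strip l != "")).take
        (((pvSums cur (lines.filter (fun l => PySem.Str.strip l != ""))).filter
          (fun t => t ≤ target)).length) := by
  induction lines generalizing cur with
  | nil => simp [pvLoopA, pvSums]
  | cons l ls ih =>
    by_cases hb : PySem.Str.strip l = ""
    · simp [pvLoopA, hb, ih cur]
    · have hb' : (PySem.Str.strip l != "") = true := by simp [hb]
      by_cases hle : cur + PySem.Str.len l ≤ target
      all_goals simp only [PySem.Str.len_eq, String.length_toList] at hle
      · have hstep : pvLoopA target (l :: ls) cur =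
            l :: pvLoopA target ls (cur + PySem.Str.len l) := by
          simp [pvLoopA, hb, hle]
        rw [hstep, ih (cur + PySem.Str.len l)]
        simp [List.filter_cons, hb', pvSums, hle]
      · have hstep : pvLoopA target (l :: ls) cur = [] := by
          simp [pvLoopA, hb, hle]
        have hnone : (pvSums cur ((l :: ls).filter (fun l => PySem.Str.strip l != ""))).filter
            (fun t => t ≤ target) = [] := by
          rw [List.filter_eq_nil_iff]
          intro t ht
          simp only [List.filter_cons, hb', if_true, pvSums, List.mem_cons] at ht
          have hct : cur + PySem.Str.len l ≤ t := by
            rcases ht with rfl | ht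
            · omega
            · exact pvSums_ge _ _ t ht
          simp only [decide_eq_true_eq]
          simp only [PySem.Str.len_eq, String.length_toList] at hct
          omega
        rw [hstep, hnone]
        simp

-- ===== VERDICT (by name: the statement is the Claim_ definition above) =====
theorem compress_summary_py_spec : Claim_equal_compress_summary_py := by
  intro text target_length _
  show _ = _
  unfold compress_summary_py compress_summary_py_alt
  simp only [loopA_eq_take]
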